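-- pv_equiv track=rewrite | github.com/nvberegovykh/EnergyPlusReviewPackager | EnergyPlusReviewPackager.py | _section_pages_to_ranges
-- ===== SOURCE A (Python) =====
-- def _section_key_to_category(key: str) -> str:
--     """Map Report/section key to index category: annual, hvac, envelope, lighting."""
--     k = (key or "").lower()
--     if k == "__start__":
--         return "annual"
--     if any(x in k for x in ("annual", "output:variable", "end use", "utility", "site and source")):
--         return "annual"
--     if any(x in k for x in ("sizing", "component", "coil", "system", "hvac", "equipment", "dx", "pump", "boiler")):
--         return "hvac"
--     if any(x in k for x in ("opaque", "envelope", "fenestration", "construction", "wall", "roof", "floor")):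
--         return "envelope"
--     if any(x in k for x in ("lighting", "lpd")):
--         return "lighting"
--     return ""
--
-- def _section_pages_to_ranges(section_pages: list, total_pages: int) -> dict:
--     """Convert [(key, page), ...] to {category: [(start_page, end_page), ...]} using all matching pages."""
--     if not section_pages:
--         return {}
--     cat_to_pages = {}
--     for key, pg in sorted(section_pages, key=lambda x: x[1]):
--         cat = _section_key_to_category(key)
--         if not cat:
--             continue
--         if not isinstance(pg, int) or pg <= 0:
--             continue
--         if total_pages and pg > total_pages:
--             continue
--         cat_to_pages.setdefault(cat, set()).add(pg)
--
--     out = {}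
--     for cat, pages_set in cat_to_pages.items():
--         pages = sorted(pages_set)
--         if not pages:
--             continue
--         ranges = []
--         start = prev = pages[0]
--         for p in pages[1:]:
--             if p == prev + 1:
--                 prev = p
--             else:
--                 ranges.append((start, prev))
--                 start = prev = p
--         ranges.append((start, prev))
--         out[cat] = ranges
--     return out
-- ===== SOURCE B (Python) =====
-- def _section_key_to_category(key: str) -> str:
--     """Map Report/section key to index category: annual, hvac, envelope, lighting."""
--     k = (key or "").lower()
--     if k == "__start__":
--         return "annual"
--     if any(x in k for x in ("annual", "output:variable", "end use", "utility", "site and source")):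
--         return "annual"
--     if any(x in k for x in ("sizing", "component", "coil", "system", "hvac", "equipment", "dx", "pump", "boiler")):
--         return "hvac"
--     if any(x in k for x in ("opaque", "envelope", "fenestration", "construction", "wall", "roof", "floor")):
--         return "envelope"
--     if any(x in k for x in ("lighting", "lpd")):
--         return "lighting"
--     return ""
--
-- def _section_pages_to_ranges(section_pages: list, total_pages: int) -> dict:
--     """Single pass over the pages in ascending order, extending each category's
--     last range in place; no intermediate sets and no second merging phase."""
--     out = {}
--     for key, pg in sorted(section_pages, key=lambda x: x[1]):
--         cat = _section_key_to_category(key)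
--         if not cat or not isinstance(pg, int) or pg <= 0 or (total_pages and pg > total_pages):
--             continue
--         r = out.get(cat)
--         if r is None:
--             out[cat] = [(pg, pg)]
--         else:
--             s, e = r[-1]
--             if pg == e:
--                 continue
--             if pg == e + 1:
--                 r[-1] = (s, pg)
--             else:
--                 r.append((pg, pg))
--     return out
-- ===== Notes on version B (the rewrite author's own statement) =====
-- stated objective: simpler
-- what changed: A collects pages into per-category sets and then runs a second per-category sort-and-merge loop; B is a single pass over the pages in ascending order that extends or appends each category's last range in place, with no sets and no second phase.
import Mathlib
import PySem

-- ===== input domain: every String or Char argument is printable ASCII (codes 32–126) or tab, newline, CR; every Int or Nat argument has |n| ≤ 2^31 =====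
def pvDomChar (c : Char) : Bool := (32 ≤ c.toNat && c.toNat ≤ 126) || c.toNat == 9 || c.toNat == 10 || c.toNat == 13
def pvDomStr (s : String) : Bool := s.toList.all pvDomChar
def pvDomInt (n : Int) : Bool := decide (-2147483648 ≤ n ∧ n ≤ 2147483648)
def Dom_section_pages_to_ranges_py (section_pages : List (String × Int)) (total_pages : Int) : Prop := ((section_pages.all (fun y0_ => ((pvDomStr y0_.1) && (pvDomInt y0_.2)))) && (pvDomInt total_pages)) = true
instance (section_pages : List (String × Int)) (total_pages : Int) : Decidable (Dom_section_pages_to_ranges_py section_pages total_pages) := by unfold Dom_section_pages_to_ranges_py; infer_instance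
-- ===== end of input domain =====

-- B replaces A's two-phase build (pages collected into per-category sets, then a second
-- per-category merging loop) by a single pass that extends each category's last range in
-- place; objective: simpler (one phase, no sets, no per-category re-sort).

-- ===== PORT A =====
-- shared module helper: port of _section_key_to_category ('key or ""' is the identity
-- here, since "".lower() == "")
def pvCat (key : String) : String :=
  let k := PySem.Str.lower key
  if k = "__start__" then "annual"
  else if PySem.Str.isIn "annual" k || PySem.Str.isIn "output:variable" k ||
          PySem.Str.isIn "end use" k || PySem.Str.isIn "utility" k ||
          PySem.Str.isIn "site and source" k then "annual"
  else if PySem.Str.isIn "sizing" k || PySem.Str.isIn "component" k ||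
          PySem.Str.isIn "coil" k || PySem.Str.isIn "system" k ||
          PySem.Str.isIn "hvac" k || PySem.Str.isIn "equipment" k ||
          PySem.Str.isIn "dx" k || PySem.Str.isIn "pump" k ||
          PySem.Str.isIn "boiler" k then "hvac"
  else if PySem.Str.isIn "opaque" k || PySem.Str.isIn "envelope" k ||
          PySem.Str.isIn "fenestration" k || PySem.Str.isIn "construction" k ||
          PySem.Str.isIn "wall" k || PySem.Str.isIn "roof" k ||
          PySem.Str.isIn "floor" k then "envelope"
  else if PySem.Str.isIn "lighting" k || PySem.Str.isIn "lpd" k then "lighting"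
  else ""

-- body of A's first loop (pg is typed Int here, so 'isinstance(pg, int)' always holds)
def pvStepA (total_pages : Int) (d : PySem.Dict String (PySem.Set Int)) (kp : String × Int) :
    PySem.Dict String (PySem.Set Int) :=
  let cat := pvCat kp.1
  if cat = "" then d
  else if kp.2 ≤ 0 then d
  else if total_pages ≠ 0 ∧ kp.2 > total_pages then d
  else d.insert cat (PySem.Set.add (d.getD cat PySem.Set.empty) kp.2)

-- body of A's range-merging loop, state ((start, prev), ranges)
def pvRangeStep (st : (Int × Int) × List (Int × Int)) (p : Int) : (Int × Int) × List (Int × Int) :=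
  if p = st.1.2 + 1 then ((st.1.1, p), st.2) else ((p, p), st.2 ++ [st.1])

-- A's merging phase on one category's sorted page list ('start = prev = pages[0]', the
-- loop over pages[1:], then the final append)
def pvRangesOf (pages : List Int) : List (Int × Int) :=
  match pages with
  | [] => []
  | x :: rest =>
    let st := rest.foldl pvRangeStep ((x, x), [])
    st.2 ++ [st.1]

-- body of A's second loop over cat_to_pages.items()
def pvPhase2 (out : PySem.Dict String (List (Int × Int))) (cs : String × PySem.Set Int) :
    PySem.Dict String (List (Int × Int)) :=
  let pages := PySem.List.sorted cs.2 (fun x => x) false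
  if pages = [] then out else out.insert cs.1 (pvRangesOf pages)

def section_pages_to_ranges_py (section_pages : List (String × Int)) (total_pages : Int) :
    List (String × List (Int × Int)) :=
  if section_pages = [] then []
  else
    let cat_to_pages :=
      (PySem.List.sorted section_pages (fun x => x.2) false).foldl (pvStepA total_pages) PySem.Dict.empty
    (cat_to_pages.items.foldl pvPhase2 PySem.Dict.empty).items

-- ===== PORT B =====
-- body of B's single loop
def pvStepB (total_pages : Int) (d : PySem.Dict String (List (Int × Int))) (kp : String × Int) :
    PySem.Dict String (List (Int × Int)) :=
  let cat := pvCat kp.1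
  if cat = "" ∨ kp.2 ≤ 0 ∨ (total_pages ≠ 0 ∧ kp.2 > total_pages) then d
  else
    match d.get? cat with
    | none => d.insert cat [(kp.2, kp.2)]
    | some r =>
      let se := PySem.List.pyGetD r (-1) (0, 0)
      if kp.2 = se.2 then d
      else if kp.2 = se.2 + 1 then d.insert cat (PySem.List.pySetD r (-1) (se.1, kp.2))
      else d.insert cat (r ++ [(kp.2, kp.2)])

def section_pages_to_ranges_py_alt (section_pages : List (String × Int)) (total_pages : Int) :
    List (String × List (Int × Int)) :=
  ((PySem.List.sorted section_pages (fun x => x.2) false).foldl (pvStepB total_pages) PySem.Dict.empty).items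

-- ===== PRECONDITION & SPEC =====
def Spec_section_pages_to_ranges_py (section_pages : List (String × Int)) (total_pages : Int) (out : List (String × List (Int × Int))) : Prop := out = section_pages_to_ranges_py_alt section_pages total_pages
instance (section_pages : List (String × Int)) (total_pages : Int) (out : List (String × List (Int × Int))) : Decidable (Spec_section_pages_to_ranges_py section_pages total_pages out) := by unfold Spec_section_pages_to_ranges_py; infer_instance

-- ===== CLAIM (what is proved, stated in full; the proofs are below) =====
def Claim_equal_section_pages_to_ranges_py : Prop := ∀ (section_pages : List (String × Int)) (total_pages : Int), Dom_section_pages_to_ranges_py section_pages total_pages → Spec_section_pages_to_ranges_py section_pages total_pages (section_pages_to_ranges_py section_pages total_pages)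

-- ===== LEMMAS AND PROOFS =====

-- the 'prev' component of A's merging loop is the last page seen
theorem pvRangeStep_prev (rest : List Int) (st : (Int × Int) × List (Int × Int)) :
    (rest.foldl pvRangeStep st).1.2 = rest.getLastD st.1.2 := by
  induction rest generalizing st with
  | nil => rfl
  | cons y t ih =>
    simp only [List.foldl_cons, List.getLastD_cons]
    rw [ih]
    unfold pvRangeStep
    split <;> simp

-- in a strictly increasing list every element is ≤ the last (getLastD form)
theorem pv_le_getLastD (x : Int) (rest : List Int) (hp : (x :: rest).Pairwise (· < ·)) :
    ∀ y ∈ (x :: rest), y ≤ rest.getLastD x := by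
  induction rest generalizing x with
  | nil => simp
  | cons b u ih =>
    intro y hy
    simp only [List.getLastD_cons]
    rcases List.mem_cons.mp hy with rfl | hy'
    · have hxb : y < b := (List.pairwise_cons.mp hp).1 b (by simp)
      have hb := ih b (List.pairwise_cons.mp hp).2 b (by simp)
      omega
    · exact ih b (List.pairwise_cons.mp hp).2 y hy'

theorem pv_getLastD_mem (x : Int) (rest : List Int) : rest.getLastD x ∈ x :: rest := by
  induction rest generalizing x with
  | nil => simp
  | cons b u ih =>
    simp only [List.getLastD_cons]
    exact List.mem_cons_of_mem x (ih b)

-- setting r[-1] on a list with a known last element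
theorem pv_pySetD_last (l : List (Int × Int)) (a v : Int × Int) :
    PySem.List.pySetD (l ++ [a]) (-1) v = l ++ [v] := by
  have hidx : PySem.List.pyIdx? (l ++ [a]).length (-1) = some l.length := by
    simp [PySem.List.pyIdx?]
  simp only [PySem.List.pySetD, PySem.List.pySet?]
  rw [hidx]
  simp [List.set_append]

-- get? through a value-mapped item list
theorem pv_get?_map {α β : Type} (g : α → β) (l : List (String × α)) (k : String) :
    (PySem.Dict.mk (l.map (fun cs => (cs.1, g cs.2)))).get? k =
      ((PySem.Dict.mk l).get? k).map g := by
  induction l with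
  | nil => rfl
  | cons c t ih =>
    obtain ⟨k1, v1⟩ := c
    simp only [List.map_cons, PySem.Dict.get?_mk_cons]
    split <;> simp [ih]

def pvF (cs : String × PySem.Set Int) : String × List (Int × Int) := (cs.1, pvRangesOf cs.2)

-- get? of the value-mapped dict
theorem pv_get?_rel (dA : PySem.Dict String (PySem.Set Int)) (dB : PySem.Dict String (List (Int × Int)))
    (hrel : dB.items = dA.items.map pvF) (k : String) :
    dB.get? k = (dA.get? k).map pvRangesOf := by
  have h1 : dB = PySem.Dict.mk (dA.items.map (fun cs => (cs.1, pvRangesOf cs.2))) := by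
    apply PySem.Dict.ext
    exact hrel
  rw [h1, pv_get?_map]

-- re-inserting a present binding is the identity
theorem pv_insert_self {ν : Type} (d : PySem.Dict String ν) (c : String) (s : ν)
    (hnd : d.keys.Nodup) (hs : d.get? c = some s) : d.insert c s = d := by
  apply PySem.Dict.ext
  rw [PySem.Dict.items_insert_of_contains (h := by rw [PySem.Dict.contains_eq_isSome_get?, hs]; rfl)]
  conv_rhs => rw [← List.map_id d.items]
  apply List.map_congr_left
  intro q hq
  obtain ⟨q1, q2⟩ := q
  by_cases hqc : q1 == c
  · have hg : d.get? q1 = some q2 := by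
      exact PySem.Dict.get?_of_mem_items _ hq hnd
    rw [eq_of_beq hqc, hs] at hg
    simp only [if_pos hqc, id]
    rw [eq_of_beq hqc, Option.some_inj.mp hg]
  · simp [hqc]

-- overwriting an existing key commutes with the per-value map pvF
theorem pv_insert_rel (dA : PySem.Dict String (PySem.Set Int)) (dB : PySem.Dict String (List (Int × Int)))
    (c : String) (v' : PySem.Set Int)
    (hrel : dB.items = dA.items.map pvF) (hcA : dA.contains c = true) :
    (dB.insert c (pvRangesOf v')).items = (dA.insert c v').items.map pvF := by
  have hcB : dB.contains c = true := by
    rw [PySem.Dict.contains_eq_isSome_get?, pv_get?_rel dA dB hrel,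
        Option.isSome_map]
    rw [PySem.Dict.contains_eq_isSome_get?] at hcA
    exact hcA
  rw [PySem.Dict.items_insert_of_contains (h := hcB), PySem.Dict.items_insert_of_contains (h := hcA),
      hrel, List.map_map, List.map_map]
  apply List.map_congr_left
  intro q _
  by_cases hqc : q.1 == c
  · simp [Function.comp, pvF, hqc]
  · simp [Function.comp, pvF, hqc]

-- appending one larger page to a nonempty sorted run, through A's merging phase
theorem pvRangesOf_snoc (x p : Int) (rest : List Int) :
    pvRangesOf ((x :: rest) ++ [p]) =
      if p = (rest.foldl pvRangeStep ((x, x), [])).1.2 + 1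
      then (rest.foldl pvRangeStep ((x, x), [])).2 ++ [((rest.foldl pvRangeStep ((x, x), [])).1.1, p)]
      else ((rest.foldl pvRangeStep ((x, x), [])).2 ++ [(rest.foldl pvRangeStep ((x, x), [])).1]) ++ [(p, p)] := by
  simp only [List.cons_append, pvRangesOf, List.foldl_append, List.foldl_cons, List.foldl_nil]
  unfold pvRangeStep
  split <;> simp

-- invariant carried through A's first loop
def pvInv (L : List (String × Int)) (d : PySem.Dict String (PySem.Set Int)) : Prop :=
  d.keys.Nodup ∧
  ∀ cs ∈ d.items, cs.2 ≠ [] ∧ cs.2.Pairwise (· < ·) ∧ ∀ y ∈ cs.2, ∃ a ∈ L, a.2 = y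

theorem pvInv_mono (L : List (String × Int)) (kp : String × Int) (d : PySem.Dict String (PySem.Set Int))
    (h : pvInv L d) : pvInv (L ++ [kp]) d := by
  refine ⟨h.1, fun cs hcs => ?_⟩
  obtain ⟨h1, h2, h3⟩ := h.2 cs hcs
  exact ⟨h1, h2, fun y hy => by obtain ⟨a, ha, hay⟩ := h3 y hy; exact ⟨a, List.mem_append_left _ ha, hay⟩⟩

theorem pvMain (tp : Int) : ∀ L : List (String × Int), L.Pairwise (fun a b => a.2 ≤ b.2) →
    pvInv L (L.foldl (pvStepA tp) PySem.Dict.empty) ∧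
    (L.foldl (pvStepB tp) PySem.Dict.empty).items =
      (L.foldl (pvStepA tp) PySem.Dict.empty).items.map pvF := by
  intro L
  induction L using List.reverseRecOn with
  | nil =>
    intro _
    refine ⟨⟨?_, ?_⟩, ?_⟩ <;> simp [PySem.Dict.empty]
  | append_singleton M kp ih =>
    intro hL
    obtain ⟨hM, -, hcross⟩ := List.pairwise_append.mp hL
    have hMle : ∀ a ∈ M, a.2 ≤ kp.2 := fun a ha => hcross a ha kp (List.mem_singleton.mpr rfl)
    obtain ⟨hInv, hrel⟩ := ih hM
    set dA := M.foldl (pvStepA tp) PySem.Dict.empty with hdA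
    set dB := M.foldl (pvStepB tp) PySem.Dict.empty with hdB
    simp only [List.foldl_append, List.foldl_cons, List.foldl_nil, ← hdA, ← hdB]
    simp only [pvStepA, pvStepB]
    by_cases h1 : pvCat kp.1 = ""
    · rw [if_pos h1, if_pos (Or.inl h1)]
      exact ⟨pvInv_mono M kp dA hInv, hrel⟩
    by_cases h2 : kp.2 ≤ 0
    · rw [if_neg h1, if_pos h2, if_pos (Or.inr (Or.inl h2))]
      exact ⟨pvInv_mono M kp dA hInv, hrel⟩
    by_cases h3 : tp ≠ 0 ∧ kp.2 > tp
    · rw [if_neg h1, if_neg h2, if_pos h3, if_pos (Or.inr (Or.inr h3))]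
      exact ⟨pvInv_mono M kp dA hInv, hrel⟩
    rw [if_neg h1, if_neg h2, if_neg h3, if_neg (by tauto)]
    rcases hA : dA.get? (pvCat kp.1) with - | s
    · -- the category is new
      have hcA : dA.contains (pvCat kp.1) = false := by
        rw [PySem.Dict.contains_eq_isSome_get?, hA]; rfl
      have hgB : dB.get? (pvCat kp.1) = none := by
        rw [pv_get?_rel dA dB hrel, hA]; rfl
      have hadd : PySem.Set.add (dA.getD (pvCat kp.1) PySem.Set.empty) kp.2 = [kp.2] := by
        rw [PySem.Dict.getD_eq_get?_getD, hA]
        rfl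
      have hcB : dB.contains (pvCat kp.1) = false := by
        rw [PySem.Dict.contains_eq_isSome_get?, hgB]; rfl
      rw [hgB]
      constructor
      · refine ⟨?_, ?_⟩
        · rw [hadd, PySem.Dict.keys_insert_of_not_contains (h := hcA)]
          have hnotin : pvCat kp.1 ∉ dA.keys := by
            intro hmem
            rw [← PySem.Dict.contains_iff_mem_keys, hcA] at hmem
            simp at hmem
          rw [List.nodup_append]
          refine ⟨hInv.1, List.nodup_singleton _, ?_⟩
          intro a ha b hb hab
          have hbc : b = pvCat kp.1 := List.mem_singleton.mp hb
          exact hnotin (hbc ▸ hab ▸ ha)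
        · intro cs hcs
          rw [hadd, PySem.Dict.items_insert_of_not_contains (h := hcA)] at hcs
          rcases List.mem_append.mp hcs with hcs' | hcs'
          · exact (pvInv_mono M kp dA hInv).2 cs hcs'
          · rw [List.mem_singleton] at hcs'
            subst hcs'
            exact ⟨by simp, by simp, fun y hy => ⟨kp, List.mem_append_right _ (by simp), by simp at hy; omega⟩⟩
      · rw [hadd, PySem.Dict.items_insert_of_not_contains (h := hcA),
            PySem.Dict.items_insert_of_not_contains (h := hcB), hrel, List.map_append]
        rfl
    · -- the category already has pages
      have hcA : dA.contains (pvCat kp.1) = true := by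
        rw [PySem.Dict.contains_eq_isSome_get?, hA]; rfl
      have hmemA : (pvCat kp.1, s) ∈ dA.items := by
        exact PySem.Dict.mem_items_of_get?_eq_some _ hA
      obtain ⟨hne, hpw, hsrc⟩ := hInv.2 _ hmemA
      have hub : ∀ y ∈ s, y ≤ kp.2 := by
        intro y hy
        obtain ⟨a, haM, hay⟩ := hsrc y hy
        rw [← hay]
        exact hMle a haM
      obtain ⟨x, rest, rfl⟩ := List.exists_cons_of_ne_nil hne
      have hgD : dA.getD (pvCat kp.1) PySem.Set.empty = x :: rest := by
        rw [PySem.Dict.getD_eq_get?_getD, hA]; rfl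
      set st := rest.foldl pvRangeStep ((x, x), []) with hst
      have hr : pvRangesOf (x :: rest) = st.2 ++ [st.1] := rfl
      have hgB : dB.get? (pvCat kp.1) = some (st.2 ++ [st.1]) := by
        rw [pv_get?_rel dA dB hrel, hA, Option.map_some, hr]
      have hlast : st.1.2 = rest.getLastD x := by
        rw [hst, pvRangeStep_prev]
      have hse : PySem.List.pyGetD (st.2 ++ [st.1]) (-1) (0, 0) = st.1 :=
        PySem.List.pyGetD_neg_one_append_singleton ..
      have hle : ∀ y ∈ (x :: rest), y ≤ st.1.2 := by
        rw [hlast]; exact pv_le_getLastD x rest hpw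
      have hlp : st.1.2 ≤ kp.2 := hub _ (by rw [hlast]; exact pv_getLastD_mem x rest)
      rw [hgB]
      simp only [hse]
      by_cases hpe : kp.2 = st.1.2
      · -- duplicate page: both sides unchanged
        have hin : kp.2 ∈ (x :: rest) := by rw [hpe, hlast]; exact pv_getLastD_mem x rest
        have hsame : dA.insert (pvCat kp.1) (PySem.Set.add (dA.getD (pvCat kp.1) PySem.Set.empty) kp.2) = dA := by
          rw [hgD, PySem.Set.add_of_mem hin]
          exact pv_insert_self dA _ _ hInv.1 hA
        rw [if_pos hpe, hsame]
        exact ⟨pvInv_mono M kp dA hInv, hrel⟩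
      · -- new page, strictly larger than everything in the set
        have hlt : st.1.2 < kp.2 := lt_of_le_of_ne hlp (fun h => hpe h.symm)
        have hnotin : kp.2 ∉ (x :: rest) := fun hmem => absurd (hle _ hmem) (by omega)
        have hadd : PySem.Set.add (dA.getD (pvCat kp.1) PySem.Set.empty) kp.2 = (x :: rest) ++ [kp.2] := by
          rw [hgD, PySem.Set.add_of_not_mem hnotin]
        have hInv' : pvInv (M ++ [kp]) (dA.insert (pvCat kp.1) ((x :: rest) ++ [kp.2])) := by
          refine ⟨?_, ?_⟩
          · rw [PySem.Dict.keys_insert_of_contains (h := hcA)]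
            exact hInv.1
          · intro cs hcs
            rcases (PySem.Dict.mem_items_insert ..).mp hcs with hcs' | ⟨hcs', -⟩
            · subst hcs'
              refine ⟨by simp, ?_, ?_⟩
              · rw [List.pairwise_append]
                refine ⟨hpw, by simp, fun a ha b hb => ?_⟩
                rw [List.mem_singleton] at hb
                subst hb
                exact lt_of_le_of_lt (hle a ha) hlt
              · intro y hy
                rcases List.mem_append.mp hy with hy' | hy'
                · obtain ⟨a, haM, hay⟩ := hsrc y hy'
                  exact ⟨a, List.mem_append_left _ haM, hay⟩
                · rw [List.mem_singleton] at hy'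
                  exact ⟨kp, List.mem_append_right _ (by simp), hy'.symm⟩
            · exact (pvInv_mono M kp dA hInv).2 cs hcs'
        have hrange : pvRangesOf ((x :: rest) ++ [kp.2]) =
            if kp.2 = st.1.2 + 1 then st.2 ++ [(st.1.1, kp.2)]
            else (st.2 ++ [st.1]) ++ [(kp.2, kp.2)] := by
          rw [pvRangesOf_snoc, ← hst]
        rw [if_neg hpe, hadd]
        by_cases hpe1 : kp.2 = st.1.2 + 1
        · rw [if_pos hpe1, pv_pySetD_last]
          refine ⟨hInv', ?_⟩
          have : st.2 ++ [(st.1.1, kp.2)] = pvRangesOf ((x :: rest) ++ [kp.2]) := by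
            rw [hrange, if_pos hpe1]
          rw [this]
          exact pv_insert_rel dA dB _ _ hrel hcA
        · rw [if_neg hpe1]
          refine ⟨hInv', ?_⟩
          have : (st.2 ++ [st.1]) ++ [(kp.2, kp.2)] = pvRangesOf ((x :: rest) ++ [kp.2]) := by
            rw [hrange, if_neg hpe1]
          rw [this]
          exact pv_insert_rel dA dB _ _ hrel hcA

-- A's second phase over a dict satisfying the invariant is exactly the per-value map pvF
theorem pvPhase2_eq (d : PySem.Dict String (PySem.Set Int)) (hnd : d.keys.Nodup)
    (hit : ∀ cs ∈ d.items, cs.2 ≠ [] ∧ cs.2.Pairwise (· < ·)) :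
    (d.items.foldl pvPhase2 PySem.Dict.empty).items = d.items.map pvF := by
  have hcongr : d.items.foldl pvPhase2 PySem.Dict.empty =
      d.items.foldl (fun out cs => out.insert cs.1 (pvRangesOf cs.2)) PySem.Dict.empty := by
    apply PySem.List.foldl_congr_mem
    intro acc cs hcs
    obtain ⟨hne, hpw⟩ := hit cs hcs
    have hsorted : PySem.List.sorted cs.2 (fun x => x) false = cs.2 :=
      PySem.List.sorted_eq_self_of_pairwise _ _ (hpw.imp (fun h => le_of_lt h))
    simp only [pvPhase2, hsorted, if_neg hne]
  rw [hcongr, PySem.Dict.items_foldl_insert_fresh]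
  · rfl
  · intro a _
    rfl
  · exact hnd

-- ===== VERDICT (by name: the statement is the Claim_ definition above) =====
theorem section_pages_to_ranges_py_spec : Claim_equal_section_pages_to_ranges_py := by
  intro sp tp _
  unfold Spec_section_pages_to_ranges_py section_pages_to_ranges_py section_pages_to_ranges_py_alt
  by_cases hsp : sp = []
  · subst hsp
    rfl
  · rw [if_neg hsp]
    obtain ⟨hInv, hrel⟩ := pvMain tp (PySem.List.sorted sp (fun x => x.2) false)
      (PySem.List.sorted_pairwise ..)
    rw [pvPhase2_eq _ hInv.1 (fun cs hcs => ⟨(hInv.2 cs hcs).1, (hInv.2 cs hcs).2.1⟩), hrel]
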